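-- pv_equiv track=rewrite | github.com/Joshkaki00/leetcode-questions | rotatingboxes.py | count_stones_and_obstacles
-- ===== SOURCE A (Python) =====
-- def count_stones_and_obstacles(row):
--     """Count stones and record obstacle positions in a row"""
--     stones = []
--     obstacles = []
--     stone_count = 0
--
--     for j, cell in enumerate(row):
--         if cell == '#':
--             stone_count += 1
--         elif cell == '*':
--             obstacles.append(j)
--             stones.append(stone_count)
--             stone_count = 0
--
--     # Don't forget stones after the last obstacle
--     stones.append(stone_count)
--     return stones, obstacles
-- ===== SOURCE B (Python) =====
-- def count_stones_and_obstacles(row):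
--     """Count stones and record obstacle positions in a row"""
--     obstacles = [j for j, cell in enumerate(row) if cell == '*']
--     stones = []
--     start = 0
--     for ob in obstacles:
--         stones.append(row[start:ob].count('#'))
--         start = ob + 1
--     stones.append(row[start:].count('#'))
--     return stones, obstacles
-- ===== Notes on version B (the rewrite author's own statement) =====
-- stated objective: alternative
-- what changed: Replaces A's single sweep with a running stone accumulator by a table-first decomposition: first collect the obstacle indices in one comprehension, then count '#' in each slice between consecutive obstacles (and the trailing slice).
import Mathlib
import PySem

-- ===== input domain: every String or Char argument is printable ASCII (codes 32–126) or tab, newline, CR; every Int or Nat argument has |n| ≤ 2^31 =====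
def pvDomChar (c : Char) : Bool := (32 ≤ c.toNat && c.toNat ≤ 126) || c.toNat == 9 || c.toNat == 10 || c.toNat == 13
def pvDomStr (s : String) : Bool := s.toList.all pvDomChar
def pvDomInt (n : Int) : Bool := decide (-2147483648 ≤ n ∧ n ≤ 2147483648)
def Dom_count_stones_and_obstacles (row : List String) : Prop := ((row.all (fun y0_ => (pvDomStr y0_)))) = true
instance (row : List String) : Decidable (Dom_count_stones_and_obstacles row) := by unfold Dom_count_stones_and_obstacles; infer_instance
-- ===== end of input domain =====

-- B replaces A's single accumulator sweep by obstacle-index collection followed by per-segment slice counting (alternative decomposition, same cost).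

-- ===== PORT A =====
-- the loop body of A's single sweep (state: stones, obstacles, stone_count)
def csoStep (s : List Int × List Int × Int) (jc : Int × String) : List Int × List Int × Int :=
  if jc.2 = "#" then (s.1, s.2.1, s.2.2 + 1)
  else if jc.2 = "*" then (s.1 ++ [s.2.2], s.2.1 ++ [jc.1], 0)
  else s

def count_stones_and_obstacles (row : List String) : List Int × List Int :=
  let st := (PySem.List.enumerate row).foldl csoStep ([], [], 0)
  (st.1 ++ [st.2.2], st.2.1)

-- ===== PORT B =====
-- Source B's 'for ob in obstacles' loop building stones (start-index threaded through)
def csoSegments (row : List String) : Int → List Int → List Int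
  | start, [] => [((PySem.List.slice row (some start) none).count "#" : Int)]
  | start, ob :: rest =>
      ((PySem.List.slice row (some start) (some ob)).count "#" : Int) ::
        csoSegments row (ob + 1) rest

def count_stones_and_obstacles_alt (row : List String) : List Int × List Int :=
  let obstacles := (PySem.List.enumerate row).filterMap
      (fun jc => if jc.2 = "*" then some jc.1 else none)
  (csoSegments row 0 obstacles, obstacles)

-- ===== PRECONDITION & SPEC =====
def Spec_count_stones_and_obstacles (row : List String) (out : List Int × List Int) : Prop := out = count_stones_and_obstacles_alt row
instance (row : List String) (out : List Int × List Int) : Decidable (Spec_count_stones_and_obstacles row out) := by unfold Spec_count_stones_and_obstacles; infer_instance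

-- ===== CLAIM (what is proved, stated in full; the proofs are below) =====
def Claim_equal_count_stones_and_obstacles : Prop := ∀ (row : List String), Dom_count_stones_and_obstacles row → Spec_count_stones_and_obstacles row (count_stones_and_obstacles row)

-- ===== LEMMAS AND PROOFS =====

-- canonical structural recursion: (per-obstacle stone counts, relative obstacle indices, trailing count)
def csoCore : List String → List Int × List Int × Int
  | [] => ([], [], 0)
  | c :: rest =>
    let r := csoCore rest
    if c = "#" then
      match r.1 with
      | [] => ([], [], r.2.2 + 1)
      | h :: tl => ((h + 1) :: tl, r.2.1.map (· + 1), r.2.2)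
    else if c = "*" then (0 :: r.1, 0 :: r.2.1.map (· + 1), r.2.2)
    else (r.1, r.2.1.map (· + 1), r.2.2)

def csoBump (cnt : Int) : List Int → List Int
  | [] => []
  | h :: tl => (cnt + h) :: tl

def csoTail (cnt : Int) (s : List Int) (t : Int) : Int :=
  match s with
  | [] => cnt + t
  | _ :: _ => t

lemma csoBump_zero (s : List Int) : csoBump 0 s = s := by
  cases s <;> simp [csoBump]

lemma csoTail_zero (s : List Int) (t : Int) : csoTail 0 s t = t := by
  cases s <;> simp [csoTail]

lemma csoCore_len (row : List String) : (csoCore row).1.length = (csoCore row).2.1.length := by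
  induction row with
  | nil => simp [csoCore]
  | cons c rest ih =>
    simp only [csoCore]
    split_ifs with h1 h2
    · cases hs : (csoCore rest).1 with
      | nil => simp [hs] at ih; simp [ih]
      | cons h tl => rw [hs] at ih; simpa using ih
    · simpa using ih
    · simpa using ih

lemma csoCore_nonneg (row : List String) : ∀ x ∈ (csoCore row).2.1, 0 ≤ x := by
  induction row with
  | nil => simp [csoCore]
  | cons c rest ih =>
    simp only [csoCore]
    split_ifs with h1 h2
    · cases hs : (csoCore rest).1 with
      | nil => simp
      | cons h tl =>
        intro x hx
        simp only [List.mem_map] at hx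
        obtain ⟨y, hy, rfl⟩ := hx
        have := ih y hy; omega
    · intro x hx
      simp only [List.mem_cons, List.mem_map] at hx
      rcases hx with rfl | ⟨y, hy, rfl⟩
      · omega
      · have := ih y hy; omega
    · intro x hx
      simp only [List.mem_map] at hx
      obtain ⟨y, hy, rfl⟩ := hx
      have := ih y hy; omega

-- A's fold over any suffix, from any state, in terms of csoCore
lemma cso_fold_eq (rest : List String) : ∀ (k : Int) (stones obs : List Int) (cnt : Int),
    (PySem.List.enumerate rest k).foldl csoStep (stones, obs, cnt) =
      (stones ++ csoBump cnt (csoCore rest).1,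
       obs ++ (csoCore rest).2.1.map (· + k),
       csoTail cnt (csoCore rest).1 (csoCore rest).2.2) := by
  induction rest with
  | nil => intro k stones obs cnt; simp [csoCore, csoBump, csoTail, PySem.List.enumerate]
  | cons c rest ih =>
    intro k stones obs cnt
    rw [PySem.List.enumerate_cons, List.foldl_cons]
    simp only [csoStep, csoCore]
    split_ifs with h1 h2
    · -- c = "#"
      rw [ih]
      cases hs : (csoCore rest).1 with
      | nil =>
        have hl := csoCore_len rest
        rw [hs] at hl
        have ho : (csoCore rest).2.1 = [] := by
          cases h : (csoCore rest).2.1 <;> simp [h] at hl ⊢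
        simp [ho, csoBump, csoTail]
        omega
      | cons h tl =>
        simp only [csoBump, csoTail, List.map_map]
        refine Prod.ext ?_ (Prod.ext ?_ rfl)
        · simp; ring_nf
        · simp only []
          congr 1
          apply List.map_congr_left
          intro x _; simp [Function.comp]; ring
    · -- c = "*"
      rw [ih]
      refine Prod.ext ?_ (Prod.ext ?_ ?_)
      · cases hcs : (csoCore rest).1 with
        | nil => simp [csoBump]
        | cons h tl => simp [csoBump]
      · simp only [List.map_cons, List.map_map, List.append_assoc, List.cons_append,
          List.nil_append]
        congr 2
        · omega
        · apply List.map_congr_left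
          intro x _; simp [Function.comp]; ring
      · rw [csoTail_zero]; rfl
    · -- other cell
      rw [ih]
      refine Prod.ext rfl (Prod.ext ?_ rfl)
      simp only [List.map_map]
      congr 1
      apply List.map_congr_left
      intro x _; simp [Function.comp]; ring

lemma cso_obs_eq (rest : List String) : ∀ (k : Int),
    (PySem.List.enumerate rest k).filterMap (fun jc => if jc.2 = "*" then some jc.1 else none)
      = (csoCore rest).2.1.map (· + k) := by
  induction rest with
  | nil => intro k; simp [csoCore, PySem.List.enumerate]
  | cons c rest ih =>
    intro k
    rw [PySem.List.enumerate_cons, List.filterMap_cons]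
    by_cases h2 : c = "*"
    · have h1 : ¬ c = "#" := by rw [h2]; decide
      simp only [csoCore, if_pos h2, if_neg h1, ih, List.map_cons, List.map_map]
      simp only [List.cons.injEq]
      refine ⟨by omega, ?_⟩
      apply List.map_congr_left
      intro x _; simp [Function.comp]; ring
    · by_cases h1 : c = "#"
      · simp only [csoCore, if_neg h2, if_pos h1, ih]
        cases hs : (csoCore rest).1 with
        | nil =>
          have hl := csoCore_len rest
          rw [hs] at hl
          have ho : (csoCore rest).2.1 = [] := by
            cases h : (csoCore rest).2.1 <;> simp [h] at hl ⊢
          simp [ho]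
        | cons h tl =>
          simp only [List.map_map]
          apply List.map_congr_left
          intro x _; simp [Function.comp]; ring
      · simp only [csoCore, if_neg h2, if_neg h1, ih, List.map_map]
        apply List.map_congr_left
        intro x _; simp [Function.comp]; ring

lemma cso_segs_shift (c : String) (row : List String) :
    ∀ (obs : List Int) (start : Int), 0 ≤ start → (∀ x ∈ obs, 0 ≤ x) →
    csoSegments (c :: row) (start + 1) (obs.map (· + 1)) = csoSegments row start obs := by
  intro obs
  induction obs generalizing row with
  | nil =>
    intro start hs _
    simp only [List.map_nil, csoSegments]
    rw [PySem.List.slice_from _ (by omega : (0:Int) ≤ start + 1), PySem.List.slice_from _ hs]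
    rw [Int.toNat_add hs (by omega)]
    simp
  | cons ob rest ih =>
    intro start hs hnn
    have hob : 0 ≤ ob := hnn ob (by simp)
    simp only [List.map_cons, csoSegments]
    congr 1
    · rw [PySem.List.slice_toNat _ (by omega : (0:Int) ≤ start + 1) (by omega : (0:Int) ≤ ob + 1),
        PySem.List.slice_toNat _ hs hob,
        Int.toNat_add hs (by omega), Int.toNat_add hob (by omega)]
      simp
    · exact ih row (ob + 1) (by omega) (fun x hx => hnn x (by simp [hx]))

lemma cso_segs_core (row : List String) :
    csoSegments row 0 ((csoCore row).2.1) = (csoCore row).1 ++ [(csoCore row).2.2] := by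
  induction row with
  | nil => simp [csoCore, csoSegments, PySem.List.slice_none_none]
  | cons c row ih =>
    have hnn := csoCore_nonneg row
    simp only [csoCore]
    split_ifs with h1 h2
    · -- c = "#"
      cases hs : (csoCore row).1 with
      | nil =>
        have hl := csoCore_len row
        rw [hs] at hl
        have ho : (csoCore row).2.1 = [] := List.length_eq_zero_iff.mp (by simpa using hl.symm)
        rw [hs, ho] at ih
        simp only [csoSegments, PySem.List.slice_zero_start, PySem.List.slice_none_none] at ih ⊢
        simp only [List.nil_append, List.cons.injEq, and_true] at ih ⊢
        rw [h1, List.count_cons_self, ← ih]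
        push_cast
        ring
      | cons h tl =>
        cases ho : (csoCore row).2.1 with
        | nil =>
          have hl := csoCore_len row
          rw [hs, ho] at hl; simp at hl
        | cons ob o' =>
          rw [hs, ho] at ih
          have hob : 0 ≤ ob := hnn ob (by simp [ho])
          simp only [csoSegments, List.map_cons] at ih ⊢
          rw [PySem.List.slice_zero_start, PySem.List.slice_to _ hob] at ih
          rw [PySem.List.slice_zero_start, PySem.List.slice_to _ (by omega : (0:Int) ≤ ob + 1)]
          simp only [Int.toNat_add hob (by omega : (0:Int) ≤ 1), Int.toNat_one,
            List.take_succ_cons]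
          rw [cso_segs_shift c row o' (ob + 1) (by omega)
              (fun x hx => hnn x (by simp [ho, hx]))]
          simp only [List.cons_append, List.cons.injEq] at ih ⊢
          obtain ⟨ih1, ih2⟩ := ih
          refine ⟨?_, ih2⟩
          rw [h1, List.count_cons_self, ← ih1]
          push_cast
          ring
    · -- c = "*"
      simp only [csoSegments]
      rw [PySem.List.slice_zero_start, PySem.List.slice_to _ le_rfl]
      rw [cso_segs_shift c row (csoCore row).2.1 0 le_rfl hnn]
      simp [ih]
    · -- other cell
      cases hs : (csoCore row).1 with
      | nil =>
        have hl := csoCore_len row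
        rw [hs] at hl
        have ho : (csoCore row).2.1 = [] := List.length_eq_zero_iff.mp (by simpa using hl.symm)
        rw [hs, ho] at ih
        simp only [ho, List.map_nil, csoSegments, PySem.List.slice_zero_start,
          PySem.List.slice_none_none] at ih ⊢
        simp only [List.nil_append, List.cons.injEq, and_true] at ih ⊢
        rw [List.count_cons_of_ne (by simpa [eq_comm] using h1), ih]
      | cons h tl =>
        cases ho : (csoCore row).2.1 with
        | nil =>
          have hl := csoCore_len row
          rw [hs, ho] at hl; simp at hl
        | cons ob o' =>
          rw [hs, ho] at ih
          have hob : 0 ≤ ob := hnn ob (by simp [ho])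
          simp only [csoSegments, List.map_cons] at ih ⊢
          rw [PySem.List.slice_zero_start, PySem.List.slice_to _ hob] at ih
          rw [PySem.List.slice_zero_start, PySem.List.slice_to _ (by omega : (0:Int) ≤ ob + 1)]
          simp only [Int.toNat_add hob (by omega : (0:Int) ≤ 1), Int.toNat_one,
            List.take_succ_cons]
          rw [cso_segs_shift c row o' (ob + 1) (by omega)
              (fun x hx => hnn x (by simp [ho, hx]))]
          simp only [List.cons_append, List.cons.injEq] at ih ⊢
          obtain ⟨ih1, ih2⟩ := ih
          refine ⟨?_, ih2⟩
          rw [List.count_cons_of_ne (by simpa [eq_comm] using h1), ih1]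

lemma cso_A_char (row : List String) :
    count_stones_and_obstacles row =
      ((csoCore row).1 ++ [(csoCore row).2.2], (csoCore row).2.1) := by
  unfold count_stones_and_obstacles
  rw [cso_fold_eq]
  simp [csoBump_zero, csoTail_zero]

theorem count_stones_and_obstacles_spec : Claim_equal_count_stones_and_obstacles := by
  intro row _
  show count_stones_and_obstacles row = count_stones_and_obstacles_alt row
  have hobs : (PySem.List.enumerate row).filterMap
      (fun jc => if jc.2 = "*" then some jc.1 else none) = (csoCore row).2.1 := by
    rw [cso_obs_eq]; simp
  simp only [count_stones_and_obstacles_alt, hobs]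
  rw [cso_A_char, cso_segs_core]
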